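-- pv_equiv track=rewrite | github.com/pedromouzinho/dbde_ai_assistant-main | scripts/build_story_repo_phase1_assets.py | extract_first_heading
-- ===== SOURCE A (Python) =====
-- def extract_first_heading(markdown_text: str) -> str:
--     for raw_line in markdown_text.splitlines()[:20]:
--         line = str(raw_line or "").strip()
--         if line.startswith("#"):
--             return line.lstrip("#").strip()
--     for raw_line in markdown_text.splitlines()[:20]:
--         line = str(raw_line or "").strip()
--         if line:
--             return line[:120]
--     return ""
-- ===== SOURCE B (Python) =====
-- def extract_first_heading(markdown_text: str) -> str:
--     first_nonempty = None
--     for raw_line in markdown_text.splitlines()[:20]: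
--         line = raw_line.strip()
--         if line.startswith("#"):
--             return line.lstrip("#").strip()
--         if first_nonempty is None and line:
--             first_nonempty = line[:120]
--     return first_nonempty if first_nonempty is not None else ""
-- ===== Notes on version B (the rewrite author's own statement) =====
-- stated objective: simpler
-- what changed: Replaced A's two sequential scans over splitlines()[:20] with a single pass that returns immediately on a heading and carries the first nonempty line in an accumulator.
import Mathlib
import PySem

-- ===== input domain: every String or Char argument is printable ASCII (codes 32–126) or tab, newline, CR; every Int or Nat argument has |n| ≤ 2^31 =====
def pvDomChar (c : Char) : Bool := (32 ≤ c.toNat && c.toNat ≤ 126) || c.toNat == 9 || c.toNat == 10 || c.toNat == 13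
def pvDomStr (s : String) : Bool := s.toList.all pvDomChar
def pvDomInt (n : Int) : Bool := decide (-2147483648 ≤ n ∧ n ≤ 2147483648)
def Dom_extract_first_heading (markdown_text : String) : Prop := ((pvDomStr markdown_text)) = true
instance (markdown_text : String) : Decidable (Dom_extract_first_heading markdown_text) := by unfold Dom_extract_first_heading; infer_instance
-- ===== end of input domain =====

-- B replaces A's two sequential scans with one pass carrying a first-nonempty accumulator (objective: simpler).

-- ===== PORT A =====
-- first loop: return the first heading line, stripped of leading '#' and whitespace
-- (line.lstrip("#") is ported exactly as dropWhile (· == '#') on the already-stripped line)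
def pvScanHead : List (List Char) → Option (List Char)
  | [] => none
  | l :: rest =>
    let line := PySem.Chars.strip l
    if PySem.Chars.startswith line ['#'] then
      some (PySem.Chars.strip (line.dropWhile (· == '#')))
    else pvScanHead rest

-- second loop: return the first nonempty stripped line, truncated to 120 chars
def pvScanFirst : List (List Char) → Option (List Char)
  | [] => none
  | l :: rest =>
    let line := PySem.Chars.strip l
    if line ≠ [] then some (PySem.List.slice line none (some 120))
    else pvScanFirst rest

def extract_first_heading (markdown_text : String) : String :=
  let ls := PySem.List.slice (PySem.Chars.splitlines markdown_text.toList) none (some 20)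
  match pvScanHead ls with
  | some h => String.ofList h
  | none =>
    match pvScanFirst ls with
    | some f => String.ofList f
    | none => ""

-- ===== PORT B =====
-- one loop; acc = the first nonempty line seen so far (None until one appears)
def pvLoopB : List (List Char) → Option (List Char) → String
  | [], acc =>
    match acc with
    | some a => String.ofList a
    | none => ""
  | l :: rest, acc =>
    let line := PySem.Chars.strip l
    if PySem.Chars.startswith line ['#'] then
      String.ofList (PySem.Chars.strip (line.dropWhile (· == '#')))
    else
      pvLoopB rest
        (if acc = none ∧ line ≠ [] then some (PySem.List.slice line none (some 120)) else acc)

def extract_first_heading_alt (markdown_text : String) : String :=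
  pvLoopB (PySem.List.slice (PySem.Chars.splitlines markdown_text.toList) none (some 20)) none

-- ===== PRECONDITION & SPEC =====
def Spec_extract_first_heading (markdown_text : String) (out : String) : Prop := out = extract_first_heading_alt markdown_text
instance (markdown_text : String) (out : String) : Decidable (Spec_extract_first_heading markdown_text out) := by unfold Spec_extract_first_heading; infer_instance

-- ===== CLAIM (what is proved, stated in full; the proofs are below) =====
def Claim_equal_extract_first_heading : Prop := ∀ (markdown_text : String), Dom_extract_first_heading markdown_text → Spec_extract_first_heading markdown_text (extract_first_heading markdown_text)

-- ===== LEMMAS AND PROOFS =====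

-- loop invariant: B's single pass with accumulator acc computes A's two-pass result,
-- with acc standing in for the first nonempty line of the already-consumed prefix
lemma pvLoopB_eq (ls : List (List Char)) (acc : Option (List Char)) :
    pvLoopB ls acc =
      match pvScanHead ls with
      | some h => String.ofList h
      | none =>
        match acc with
        | some a => String.ofList a
        | none =>
          match pvScanFirst ls with
          | some f => String.ofList f
          | none => "" := by
  induction ls generalizing acc with
  | nil => cases acc <;> simp [pvLoopB, pvScanHead, pvScanFirst]
  | cons l rest ih =>
    simp only [pvLoopB, pvScanHead, pvScanFirst]
    by_cases hh : PySem.Chars.startswith (PySem.Chars.strip l) ['#'] = true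
    · simp [hh]
    · simp only [hh, Bool.false_eq_true]
      rw [ih]
      by_cases he : PySem.Chars.strip l = []
      · simp [he]
      · cases acc <;> simp [he]

-- ===== VERDICT (by name: the statement is the Claim_ definition above) =====
theorem extract_first_heading_spec : Claim_equal_extract_first_heading := by
  intro md _
  unfold Spec_extract_first_heading extract_first_heading extract_first_heading_alt
  rw [pvLoopB_eq]
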